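-- pv_equiv track=rewrite | github.com/lemonsis/Oracle_Benchmark | platforms/puzzle/hard/nuts_and_bolts_final.py | check_answer_format
-- ===== SOURCE A (Python) =====
-- def check_answer_format(answer):
--     # answer: e.g. "Nut 1, Nut 3, Nut 2, Nut 5, Nut 4, Nut 6, Nut 7, Nut 8"
--     if not isinstance(answer, str):
--         return False
--     items = [x.strip() for x in answer.split(',')]
--     if len(items) != 8:
--         return False
--     seen = set()
--     for item in items:
--         if not item.startswith("Nut "):
--             return False
--         try:
--             num = int(item[4:])
--         except ValueError:
--             return False
--         if not (1 <= num <= 8):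
--             return False
--         if num in seen:
--             return False
--         seen.add(num)
--     return True
-- ===== SOURCE B (Python) =====
-- def check_answer_format(answer):
--     if not isinstance(answer, str):
--         return False
--     items = [x.strip() for x in answer.split(',')]
--     if len(items) != 8:
--         return False
--     nums = []
--     for item in items:
--         if not item.startswith("Nut "):
--             return False
--         try:
--             nums.append(int(item[4:]))
--         except ValueError:
--             return False
--     return sorted(nums) == list(range(1, 9))
-- ===== Notes on version B (the rewrite author's own statement) =====
-- stated objective: simpler
-- what changed: B drops the seen-set and per-item range/duplicate checks, collecting parsed numbers and checking sorted(nums) == list(range(1,9)) once at the end.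
import Mathlib
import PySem

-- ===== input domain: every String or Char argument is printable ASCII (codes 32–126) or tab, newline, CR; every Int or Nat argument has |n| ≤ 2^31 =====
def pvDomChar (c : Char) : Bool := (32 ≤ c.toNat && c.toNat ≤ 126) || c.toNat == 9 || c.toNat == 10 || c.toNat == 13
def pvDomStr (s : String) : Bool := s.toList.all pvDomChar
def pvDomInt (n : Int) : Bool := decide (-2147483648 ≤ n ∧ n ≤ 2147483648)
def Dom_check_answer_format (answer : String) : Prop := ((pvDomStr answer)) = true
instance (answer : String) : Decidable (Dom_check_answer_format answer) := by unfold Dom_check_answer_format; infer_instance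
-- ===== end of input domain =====

-- B drops A's seen-set and per-item range/duplicate checks: it collects the parsed
-- numbers and compares sorted(nums) with range(1,9) once at the end (objective: simpler).

-- ===== PORT A =====
-- the for-loop of A: seen is the Python set, items the remaining list
def checkLoopA : List String → PySem.Set Int → Bool
  | [], _ => true
  | item :: rest, seen =>
    if PySem.Str.startswith item "Nut " then
      match PySem.Int.ofStr? (PySem.Str.slice item (some 4) none) with
      | none => false
      | some num =>
        if 1 ≤ num ∧ num ≤ 8 then
          if PySem.Set.contains seen num then false
          else checkLoopA rest (PySem.Set.add seen num)
        else false
    else false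

def check_answer_format (answer : String) : Bool :=
  let items := ((PySem.Str.split? answer ",").getD []).map PySem.Str.strip
  if items.length ≠ 8 then false
  else checkLoopA items PySem.Set.empty

-- ===== PORT B =====
-- the for-loop of B: nums is the accumulated list of parsed numbers
def collectB : List String → List Int → Option (List Int)
  | [], nums => some nums
  | item :: rest, nums =>
    if PySem.Str.startswith item "Nut " then
      match PySem.Int.ofStr? (PySem.Str.slice item (some 4) none) with
      | none => none
      | some num => collectB rest (nums ++ [num])
    else none

def check_answer_format_alt (answer : String) : Bool :=
  let items := ((PySem.Str.split? answer ",").getD []).map PySem.Str.strip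
  if items.length ≠ 8 then false
  else match collectB items [] with
    | none => false
    | some nums =>
      PySem.List.sorted nums (fun x => x) false == PySem.List.pyRange 1 9 1

-- ===== PRECONDITION & SPEC =====
def Spec_check_answer_format (answer : String) (out : Bool) : Prop := out = check_answer_format_alt answer
instance (answer : String) (out : Bool) : Decidable (Spec_check_answer_format answer out) := by unfold Spec_check_answer_format; infer_instance

-- ===== CLAIM (what is proved, stated in full; the proofs are below) =====
def Claim_equal_check_answer_format : Prop := ∀ (answer : String), Dom_check_answer_format answer → Spec_check_answer_format answer (check_answer_format answer)

-- ===== LEMMAS AND PROOFS =====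

-- the shared per-item parser
def parseItem? (item : String) : Option Int :=
  if PySem.Str.startswith item "Nut " then
    PySem.Int.ofStr? (PySem.Str.slice item (some 4) none)
  else none

def parseAll : List String → Option (List Int)
  | [] => some []
  | it :: rest =>
    match parseItem? it with
    | none => none
    | some n => (parseAll rest).map (n :: ·)

theorem collectB_cons (it : String) (rest : List String) (acc : List Int) :
    collectB (it :: rest) acc =
      match parseItem? it with
      | none => none
      | some num => collectB rest (acc ++ [num]) := by
  simp only [collectB, parseItem?]
  cases PySem.Str.startswith it "Nut " <;> simp

theorem checkLoopA_cons (it : String) (rest : List String) (seen : PySem.Set Int) :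
    checkLoopA (it :: rest) seen =
      match parseItem? it with
      | none => false
      | some num =>
        if 1 ≤ num ∧ num ≤ 8 then
          if PySem.Set.contains seen num then false
          else checkLoopA rest (PySem.Set.add seen num)
        else false := by
  simp only [checkLoopA, parseItem?]
  cases PySem.Str.startswith it "Nut " <;> simp

theorem collectB_eq (items : List String) (acc : List Int) :
    collectB items acc = (parseAll items).map (acc ++ ·) := by
  induction items generalizing acc with
  | nil => simp [collectB, parseAll]
  | cons it rest ih =>
    rw [collectB_cons]
    cases hp : parseItem? it with
    | none => simp [parseAll, hp]
    | some n =>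
      simp only [parseAll, hp]
      rw [ih]
      cases parseAll rest <;> simp

theorem length_parseAll (items : List String) (ns : List Int)
    (h : parseAll items = some ns) : ns.length = items.length := by
  induction items generalizing ns with
  | nil => simp [parseAll] at h; simp [← h]
  | cons it rest ih =>
    simp only [parseAll] at h
    cases hp : parseItem? it with
    | none => simp [hp] at h
    | some n =>
      rw [hp] at h
      cases hr : parseAll rest with
      | none => simp [hr] at h
      | some ms =>
        rw [hr] at h
        simp at h
        simp [← h, ih ms hr]

theorem checkLoopA_char (items : List String) (seen : PySem.Set Int) :
    checkLoopA items seen = true ↔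
      ∃ ns, parseAll items = some ns ∧ (∀ n ∈ ns, 1 ≤ n ∧ n ≤ 8) ∧
        ns.Nodup ∧ ∀ n ∈ ns, n ∉ seen := by
  induction items generalizing seen with
  | nil => simp [checkLoopA, parseAll]
  | cons it rest ih =>
    rw [checkLoopA_cons]
    cases hp : parseItem? it with
    | none => simp [parseAll, hp]
    | some num =>
      simp only [parseAll, hp]
      by_cases hrange : 1 ≤ num ∧ num ≤ 8
      · rw [if_pos hrange]
        by_cases hc : num ∈ seen
        · rw [if_pos ((PySem.Set.contains_iff seen num).mpr hc)]
          constructor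
          · intro h; cases h
          · rintro ⟨ns, hns, _, _, hdisj⟩
            cases hr : parseAll rest with
            | none => rw [hr] at hns; cases hns
            | some ms =>
              rw [hr] at hns; simp at hns
              exact absurd hc (hdisj num (by simp [← hns]))
        · rw [if_neg (by simp [hc])]
          rw [ih]
          constructor
          · rintro ⟨ms, hms, hrg, hnd, hdisj⟩
            refine ⟨num :: ms, by simp [hms], ?_, ?_, ?_⟩
            · intro n hn
              rcases List.mem_cons.mp hn with h | h
              · exact h ▸ hrange
              · exact hrg n h
            · refine List.nodup_cons.mpr ⟨?_, hnd⟩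
              intro hmem
              exact absurd ((PySem.Set.mem_add seen num num).mpr (Or.inr rfl)) (hdisj num hmem)
            · intro n hn
              rcases List.mem_cons.mp hn with h | h
              · exact h ▸ hc
              · exact fun hmem => hdisj n h ((PySem.Set.mem_add seen num n).mpr (Or.inl hmem))
          · rintro ⟨ns, hns, hrg, hnd, hdisj⟩
            cases hr : parseAll rest with
            | none => rw [hr] at hns; cases hns
            | some ms =>
              rw [hr] at hns; simp at hns
              subst hns
              refine ⟨ms, rfl, fun n hn => hrg n (by simp [hn]), (List.nodup_cons.mp hnd).2, ?_⟩
              intro n hn hmem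
              rcases (PySem.Set.mem_add seen num n).mp hmem with h | h
              · exact hdisj n (by simp [hn]) h
              · exact (List.nodup_cons.mp hnd).1 (h ▸ hn)
      · rw [if_neg hrange]
        constructor
        · intro h; cases h
        · rintro ⟨ns, hns, hrg, _, _⟩
          cases hr : parseAll rest with
          | none => rw [hr] at hns; cases hns
          | some ms =>
            rw [hr] at hns; simp at hns
            exact absurd (hrg num (by simp [← hns])) hrange

theorem perm_range_iff (ns : List Int) (hlen : ns.length = 8) :
    ns.Perm (PySem.List.pyRange 1 9 1) ↔
      (∀ n ∈ ns, 1 ≤ n ∧ n ≤ 8) ∧ ns.Nodup := by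
  constructor
  · intro hp
    constructor
    · intro n hn
      have := PySem.List.mem_pyRange_one.mp (hp.mem_iff.mp hn)
      omega
    · exact (PySem.List.nodup_pyRange_one (a := 1) (b := 9)).perm hp.symm
  · rintro ⟨hrg, hnd⟩
    have hsub : ns ⊆ PySem.List.pyRange 1 9 1 := by
      intro n hn
      exact PySem.List.mem_pyRange_one.mpr (by have := hrg n hn; omega)
    have hsp : ns.Subperm (PySem.List.pyRange 1 9 1) := hnd.subperm hsub
    refine hsp.perm_of_length_le ?_
    rw [hlen, PySem.List.length_pyRange_one]
    decide

-- ===== VERDICT =====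
theorem check_answer_format_spec : Claim_equal_check_answer_format := by
  intro answer _
  unfold Spec_check_answer_format check_answer_format check_answer_format_alt
  set items := ((PySem.Str.split? answer ",").getD []).map PySem.Str.strip with hitems
  by_cases hlen : items.length = 8
  · rw [if_neg (by omega), if_neg (by omega)]
    rw [Bool.eq_iff_iff, checkLoopA_char]
    rw [collectB_eq]
    cases hr : parseAll items with
    | none =>
      simp only [Option.map_none]
      constructor
      · rintro ⟨ns, hns, _⟩; cases hns
      · intro h; cases h
    | some ns =>
      have hnlen : ns.length = 8 := (length_parseAll items ns hr).trans hlen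
      simp only [Option.map_some, List.nil_append, beq_iff_eq]
      have hsorted : PySem.List.sorted ns (fun x => x) false = PySem.List.pyRange 1 9 1 ↔
          ns.Perm (PySem.List.pyRange 1 9 1) := by
        rw [← PySem.List.sorted_eq_self_of_pairwise (xs := PySem.List.pyRange 1 9 1)
              (key := fun x => x)
              ((PySem.List.pairwise_lt_pyRange_one 1 9).imp le_of_lt)]
        exact PySem.List.sorted_id_eq_sorted_id_iff_perm ns _
      rw [hsorted, perm_range_iff ns hnlen]
      constructor
      · rintro ⟨ms, hms, hrg, hnd, _⟩
        injection hms with hms; subst hms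
        exact ⟨hrg, hnd⟩
      · rintro ⟨hrg, hnd⟩
        exact ⟨ns, rfl, hrg, hnd, by simp [PySem.Set.empty]⟩
  · rw [if_pos (by omega), if_pos (by omega)]
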